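-- pv_equiv track=rewrite | github.com/Dassh01/Advent-Of-Code-2024 | Day 1 - Calculate Distances/main.py | create_pairs
-- ===== SOURCE A (Python) =====
-- def create_pairs(list1,list2):
--     pairs_2d_array = []
--     for i in range(len(list1)):
--         min_from_list1 = min(list1)
--         min_from_list2 = min(list2)
--         list1.remove(min_from_list1)
--         list2.remove(min_from_list2)
--         pairs_2d_array.append([min_from_list1,min_from_list2])
--
--     return pairs_2d_array
-- ===== SOURCE B (Python) =====
-- def create_pairs(list1, list2):
--     return [[a, b] for a, b in zip(sorted(list1), sorted(list2))]
-- ===== Notes on version B (the rewrite author's own statement) =====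
-- stated objective: faster
-- what changed: Replaces the repeated min-and-remove loop (quadratic) by sorting both lists once and zipping them; B does not mutate its arguments (the equivalence is about the return value).
import Mathlib
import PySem

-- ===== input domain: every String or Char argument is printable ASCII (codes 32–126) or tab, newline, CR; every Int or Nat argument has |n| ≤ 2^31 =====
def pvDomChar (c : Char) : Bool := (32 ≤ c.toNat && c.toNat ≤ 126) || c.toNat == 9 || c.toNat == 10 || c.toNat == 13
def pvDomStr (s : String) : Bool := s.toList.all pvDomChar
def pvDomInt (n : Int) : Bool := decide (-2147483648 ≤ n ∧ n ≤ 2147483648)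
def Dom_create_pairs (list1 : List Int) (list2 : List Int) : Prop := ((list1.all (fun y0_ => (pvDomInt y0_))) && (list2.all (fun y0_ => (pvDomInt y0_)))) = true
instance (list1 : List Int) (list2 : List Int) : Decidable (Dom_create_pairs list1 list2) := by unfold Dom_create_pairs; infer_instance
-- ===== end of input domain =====

-- B sorts both lists once and zips them instead of A's repeated min-and-remove loop (asymptotically
-- faster); unlike A, B does not mutate its arguments (equivalence here is about the return value only).

-- ===== PORT A =====
-- A's loop: each iteration takes min of each list, removes it from the list, appends the pair.
def create_pairs_loop (fuel : Nat) (l1 l2 : List Int) (acc : List (List Int)) : List (List Int) :=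
  match fuel with
  | 0 => acc
  | n+1 =>
    match PySem.List.min? l1 (fun x => x), PySem.List.min? l2 (fun x => x) with
    | some m1, some m2 =>
      match PySem.List.remove? l1 m1, PySem.List.remove? l2 m2 with
      | some l1', some l2' => create_pairs_loop n l1' l2' (acc ++ [[m1, m2]])
      | _, _ => acc  -- unreachable: the removed element came from the list
    | _, _ => acc    -- min() of an empty list: Python raises ValueError, excluded by Pre_

def create_pairs (list1 : List Int) (list2 : List Int) : List (List Int) :=
  create_pairs_loop list1.length list1 list2 []

-- ===== PORT B =====
def create_pairs_alt (list1 : List Int) (list2 : List Int) : List (List Int) :=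
  ((PySem.List.sorted list1 (fun x => x) false).zip
    (PySem.List.sorted list2 (fun x => x) false)).map (fun p => [p.1, p.2])

-- ===== PRECONDITION & SPEC =====
-- A iterates len(list1) times removing one element from list2 each time, so it raises
-- ValueError (min of empty sequence) unless list2 has at least as many elements as list1.
def Pre_create_pairs (list1 : List Int) (list2 : List Int) : Prop :=
  list1.length ≤ list2.length
instance (list1 : List Int) (list2 : List Int) : Decidable (Pre_create_pairs list1 list2) := by
  unfold Pre_create_pairs; infer_instance

def pvWitness_create_pairs : List Int × List Int := ([3, 1, 2], [5, 4, 6, 0])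

def Spec_create_pairs (list1 : List Int) (list2 : List Int) (out : List (List Int)) : Prop :=
  out = create_pairs_alt list1 list2
instance (list1 : List Int) (list2 : List Int) (out : List (List Int)) : Decidable (Spec_create_pairs list1 list2 out) := by
  unfold Spec_create_pairs; infer_instance

-- ===== CLAIM (what is proved, stated in full; the proofs are below) =====
def Claim_equal_create_pairs : Prop := ∀ (list1 : List Int) (list2 : List Int), Dom_create_pairs list1 list2 → Pre_create_pairs list1 list2 → Spec_create_pairs list1 list2 (create_pairs list1 list2)

-- ===== LEMMAS AND PROOFS =====

-- Extracting the minimum and erasing it peels the head off the sorted list.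
theorem sorted_cons_erase (l : List Int) (m : Int)
    (hm : PySem.List.min? l (fun x => x) = some m) :
    PySem.List.sorted l (fun x => x) false = m :: PySem.List.sorted (l.erase m) (fun x => x) false := by
  have hmem : m ∈ l := PySem.List.min?_mem hm
  have hmin : ∀ y ∈ l, m ≤ y := PySem.List.min?_isMin hm
  refine PySem.List.sorted_id_eq_of_perm_of_pairwise _ _ ?_ ?_
  · exact ((PySem.List.sorted_perm (l.erase m) (fun x => x) false).cons m).trans
      (List.perm_cons_erase hmem).symm
  · refine List.Pairwise.cons ?_ ?_
    · intro y hy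
      exact hmin y (List.mem_of_mem_erase ((PySem.List.mem_sorted _ _ _ _).1 hy))
    · exact PySem.List.sorted_pairwise _ _

theorem loop_eq (n : Nat) : ∀ (l1 l2 : List Int) (acc : List (List Int)),
    n = l1.length → n ≤ l2.length →
    create_pairs_loop n l1 l2 acc =
      acc ++ ((PySem.List.sorted l1 (fun x => x) false).zip
        (PySem.List.sorted l2 (fun x => x) false)).map (fun p => [p.1, p.2]) := by
  induction n with
  | zero =>
    intro l1 l2 acc h1 _
    have : l1 = [] := List.eq_nil_of_length_eq_zero h1.symm
    subst this
    simp [create_pairs_loop, PySem.List.sorted]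
  | succ n ih =>
    intro l1 l2 acc h1 h2
    have hl1 : l1 ≠ [] := by intro h; subst h; simp at h1
    have hl2 : l2 ≠ [] := by
      intro h; subst h; simp at h2
    obtain ⟨m1, hm1⟩ : ∃ m, PySem.List.min? l1 (fun x => x) = some m := by
      cases h : PySem.List.min? l1 (fun x => x) with
      | none => exact absurd ((PySem.List.min?_eq_none_iff _ _).mp h) hl1
      | some m => exact ⟨m, rfl⟩
    obtain ⟨m2, hm2⟩ : ∃ m, PySem.List.min? l2 (fun x => x) = some m := by
      cases h : PySem.List.min? l2 (fun x => x) with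
      | none => exact absurd ((PySem.List.min?_eq_none_iff _ _).mp h) hl2
      | some m => exact ⟨m, rfl⟩
    have hmem1 : m1 ∈ l1 := PySem.List.min?_mem hm1
    have hmem2 : m2 ∈ l2 := PySem.List.min?_mem hm2
    have hr1 : PySem.List.remove? l1 m1 = some (l1.erase m1) :=
      PySem.List.remove?_eq_some_erase l1 m1 hmem1
    have hr2 : PySem.List.remove? l2 m2 = some (l2.erase m2) :=
      PySem.List.remove?_eq_some_erase l2 m2 hmem2
    have step : create_pairs_loop (n+1) l1 l2 acc =
        create_pairs_loop n (l1.erase m1) (l2.erase m2) (acc ++ [[m1, m2]]) := by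
      simp [create_pairs_loop, hm1, hm2, hr1, hr2]
    rw [step, ih (l1.erase m1) (l2.erase m2) (acc ++ [[m1, m2]])
      (by rw [List.length_erase_of_mem hmem1]; omega)
      (by rw [List.length_erase_of_mem hmem2]; omega)]
    rw [sorted_cons_erase l1 m1 hm1, sorted_cons_erase l2 m2 hm2]
    simp [List.zip_cons_cons]

-- ===== VERDICT (by name: the statement is the Claim_ definition above) =====
theorem create_pairs_spec : Claim_equal_create_pairs := by
  intro l1 l2 _ hpre
  unfold Spec_create_pairs create_pairs create_pairs_alt
  exact loop_eq l1.length l1 l2 [] rfl hpre
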